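-- pv_equiv track=rewrite | github.com/jbsera/6.0001-6.0002 | document_distance.py | compute_most_frequent
-- ===== SOURCE A (Python) =====
-- def compute_most_frequent(dict1, dict2):
--     """
--     The keys of dict1 and dict2 are all lowercase,
--     you will NOT need to worry about case sensitivity.
--
--     Args:
--         dict1: frequency dictionary for one text
--         dict2: frequency dictionary for another text
--     Returns:
--         list of the most frequent word(s) in the input dictionaries
--
--     The most frequent word:
--         * is based on the combined word frequencies across both dictionaries.
--           If a word occurs in both dictionaries, consider the sum the
--           freqencies as the combined word frequency.
--         * need not be in both dictionaries, i.e it can be exclusively in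
--           dict1, dict2, or shared by dict1 and dict2.
--     If multiple words are tied (i.e. share the same highest frequency),
--     return an alphabetically ordered list of all these words.
--     """
--     #initialized variables, dictionaries, and lists to be used later
--     x=0
--     total_frequency_dict={}
--     max_frequency=[]
--     L=[]
--     sorted_answer=[]
--     for key in dict1: #iterates over every key in dict 1
--         if key in dict2: #if the key is also in dict2:
--             x=dict1[key]+dict2[key] #define a new variable x that takes the frequency of the key in dict1 and adds it to the frequency of the key in dict2
--             total_frequency_dict[key]=x #add this key to the total_frequency_dict with the frequency x, taken by adding frequencies in dict1 and dict2
--         else: #if the key is only in dict1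
--             total_frequency_dict[key]=dict1[key] #add this key to the total_frequency_dict with an associated value given by the frequency of the key in dict1
--     for key in dict2:
--         if key not in dict1:#if the key is only in dict2:
--             total_frequency_dict[key]=dict2[key] #add this key to the total_frequency_dict with an associated value given by the frequency of the key in dict2
--     #By this point, we have a total_frequency-dict whose keys are the keys from dict1 and dict2, and whose associated values are the total frequencies for each specific key in dict1 and dict2
--     max_frequency=max(total_frequency_dict.values())#finds the max value or frequency from the total_frequency_dict
--     for key in total_frequency_dict: #iterate over every key in total_frequency_dict
--         if total_frequency_dict[key]==max_frequency: #if the value of that key is equal to the max value we found earlier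
--             L.append(key) #append that key to a list
--     sorted_answer=sorted(L) #sort the list alphabetically
--     return sorted_answer #returns the sorted list
-- ===== SOURCE B (Python) =====
-- def compute_most_frequent(dict1, dict2):
--     # single pass over the union of keys, keeping a running best frequency
--     # and the current list of winners (no max() + rescan)
--     best = None
--     winners = []
--     for key in {**dict1, **dict2}:
--         f = dict1.get(key, 0) + dict2.get(key, 0)
--         if best is None or f > best:
--             best = f
--             winners = [key]
--         elif f == best:
--             winners.append(key)
--     return sorted(winners)
-- ===== Notes on version B (the rewrite author's own statement) =====
-- stated objective: alternative
-- what changed: B replaces A's staged passes (build a merged frequency dict, take max() of its values, rescan all keys to filter) by a single pass over the union of keys with a running (best, winners) accumulator, computing each combined frequency on the fly with get(); no merged dict and no max()+filter passes.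
import Mathlib
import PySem

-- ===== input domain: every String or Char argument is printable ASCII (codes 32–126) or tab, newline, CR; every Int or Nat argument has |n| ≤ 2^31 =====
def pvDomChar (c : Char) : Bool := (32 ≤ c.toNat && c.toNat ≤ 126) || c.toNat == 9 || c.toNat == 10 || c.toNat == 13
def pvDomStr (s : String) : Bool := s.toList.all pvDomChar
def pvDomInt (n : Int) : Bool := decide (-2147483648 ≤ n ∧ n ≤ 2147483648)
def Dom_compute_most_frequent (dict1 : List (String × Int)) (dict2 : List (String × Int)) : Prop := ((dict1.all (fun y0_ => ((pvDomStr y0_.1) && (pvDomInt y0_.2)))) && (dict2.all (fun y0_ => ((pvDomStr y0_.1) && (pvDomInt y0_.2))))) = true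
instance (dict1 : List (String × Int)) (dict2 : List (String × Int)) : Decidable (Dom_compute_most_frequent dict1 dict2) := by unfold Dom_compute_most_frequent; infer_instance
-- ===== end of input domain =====

-- B replaces A's staged passes (merge dict, max() of values, rescan-filter) by a single pass over
-- the union of keys with a running (best, winners) accumulator (alternative decomposition, same cost).


-- ===== PORT A =====
-- the two merge loops of A (sum shared keys, keep exclusive keys)
def pvMergeA (dict1 : List (String × Int)) (dict2 : List (String × Int)) : PySem.Dict String Int :=
  let d1 : PySem.Dict String Int := PySem.Dict.mk dict1
  let d2 : PySem.Dict String Int := PySem.Dict.mk dict2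
  let t1 : PySem.Dict String Int :=
    dict1.foldl (fun t p =>
      if d2.contains p.1 then t.insert p.1 (d1.getD p.1 0 + d2.getD p.1 0)
      else t.insert p.1 (d1.getD p.1 0)) PySem.Dict.empty
  dict2.foldl (fun t p =>
    if !(d1.contains p.1) then t.insert p.1 (d2.getD p.1 0) else t) t1

def compute_most_frequent (dict1 : List (String × Int)) (dict2 : List (String × Int)) : List String :=
  let total := pvMergeA dict1 dict2
  match PySem.List.max? total.values (fun v => v) with
  | none => []  -- Python: max() of an empty dict's values raises ValueError; excluded by Pre_
  | some mx =>
    PySem.List.sorted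
      (total.items.foldl (fun L p => if total.getD p.1 0 == mx then L ++ [p.1] else L) [])
      (fun s => s) false

-- ===== PORT B =====
-- the body of B's single loop: update the running (best, winners) state with key k of score f k
def pvStepB (f : String → Int) (s : Option Int × List String) (k : String) : Option Int × List String :=
  let v := f k
  match s.1 with
  | none => (some v, [k])
  | some b => if v > b then (some v, [k]) else if v == b then (s.1, s.2 ++ [k]) else s

def compute_most_frequent_alt (dict1 : List (String × Int)) (dict2 : List (String × Int)) : List String :=
  let d1 : PySem.Dict String Int := PySem.Dict.mk dict1
  let d2 : PySem.Dict String Int := PySem.Dict.mk dict2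
  -- {**dict1, **dict2}: unpack both dicts into one; only its keys are iterated
  let union : PySem.Dict String Int :=
    dict2.foldl (fun t p => t.insert p.1 p.2)
      (dict1.foldl (fun t p => t.insert p.1 p.2) PySem.Dict.empty)
  let st := union.keys.foldl (pvStepB (fun k => d1.getD k 0 + d2.getD k 0)) (none, [])
  PySem.List.sorted st.2 (fun s => s) false

-- ===== PRECONDITION & SPEC =====
-- Pre_ excludes only the input where both dicts are empty: there Python A raises ValueError (max of empty).
def Pre_compute_most_frequent (dict1 : List (String × Int)) (dict2 : List (String × Int)) : Prop := dict1 ≠ [] ∨ dict2 ≠ []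
instance (dict1 : List (String × Int)) (dict2 : List (String × Int)) : Decidable (Pre_compute_most_frequent dict1 dict2) := by unfold Pre_compute_most_frequent; infer_instance
def pvWitness_compute_most_frequent : (List (String × Int)) × (List (String × Int)) := ([("a", 1)], [("b", 2)])

def Spec_compute_most_frequent (dict1 : List (String × Int)) (dict2 : List (String × Int)) (out : List String) : Prop := out = compute_most_frequent_alt dict1 dict2
instance (dict1 : List (String × Int)) (dict2 : List (String × Int)) (out : List String) : Decidable (Spec_compute_most_frequent dict1 dict2 out) := by unfold Spec_compute_most_frequent; infer_instance

-- ===== CLAIM (what is proved, stated in full; the proofs are below) =====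
def Claim_equal_compute_most_frequent : Prop := ∀ (dict1 : List (String × Int)) (dict2 : List (String × Int)), Dom_compute_most_frequent dict1 dict2 → Pre_compute_most_frequent dict1 dict2 → Spec_compute_most_frequent dict1 dict2 (compute_most_frequent dict1 dict2)

-- ===== LEMMAS AND PROOFS =====

-- last-write value of A's phase-1 loop (all inserts at key p.1 carry the value F p.1)
theorem getD_foldl_insert_fn (F : String → Int) (l : List (String × Int)) (t : PySem.Dict String Int) (k : String) :
    (l.foldl (fun t p => t.insert p.1 (F p.1)) t).getD k 0
      = if k ∈ l.map Prod.fst then F k else t.getD k 0 := by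
  induction l generalizing t with
  | nil => simp
  | cons p rest ih =>
    simp only [List.foldl_cons, ih, List.map_cons, List.mem_cons]
    rw [PySem.Dict.getD_insert]
    by_cases h1 : k ∈ rest.map Prod.fst <;> by_cases h2 : k = p.1 <;> simp [h1, h2]

-- value after A's phase-2 loop (insert only keys absent from dict1)
theorem getD_phase2 (g1 g2 : PySem.Dict String Int) (l : List (String × Int)) (t : PySem.Dict String Int) (k : String) :
    (l.foldl (fun t p => if !(g1.contains p.1) then t.insert p.1 (g2.getD p.1 0) else t) t).getD k 0
      = if k ∈ l.map Prod.fst ∧ g1.contains k = false then g2.getD k 0 else t.getD k 0 := by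
  induction l generalizing t with
  | nil => simp
  | cons p rest ih =>
    simp only [List.foldl_cons, ih, List.map_cons, List.mem_cons]
    by_cases hr : k ∈ rest.map Prod.fst ∧ g1.contains k = false
    · rw [if_pos hr, if_pos ⟨Or.inr hr.1, hr.2⟩]
    · rw [if_neg hr]
      by_cases hc : g1.contains p.1
      · rw [if_neg (by simp [hc])]
        rw [if_neg ?_]
        rintro ⟨hm | hm, hk⟩
        · rw [hm] at hk; rw [hc] at hk; cases hk
        · exact hr ⟨hm, hk⟩
      · rw [if_pos (by simp [hc])]
        rw [PySem.Dict.getD_insert]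
        by_cases h2 : k = p.1
        · rw [if_pos h2, if_pos ⟨Or.inl h2, by rw [h2]; simpa using hc⟩, h2]
        · rw [if_neg h2, if_neg ?_]
          rintro ⟨hm | hm, hk⟩
          · exact h2 hm
          · exact hr ⟨hm, hk⟩

-- keys after A's phase-2 loop: same as inserting every dict2 key (the skipped ones are present already)
theorem keys_phase2 (g1 g2 : PySem.Dict String Int) (l : List (String × Int)) (t : PySem.Dict String Int)
    (hinv : ∀ p ∈ l, g1.contains p.1 = true → p.1 ∈ t.keys) :
    (l.foldl (fun t p => if !(g1.contains p.1) then t.insert p.1 (g2.getD p.1 0) else t) t).keys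
      = PySem.Set.update t.keys (l.map Prod.fst) := by
  induction l generalizing t with
  | nil => simp [PySem.Set.update_nil]
  | cons p rest ih =>
    simp only [List.foldl_cons, List.map_cons, PySem.Set.update_cons]
    by_cases hc : g1.contains p.1
    · rw [if_neg (by simp [hc])]
      rw [ih t (fun q hq h => hinv q (List.mem_cons_of_mem _ hq) h)]
      congr 1
      rw [PySem.Set.add_of_mem (hinv p (List.mem_cons_self) hc)]
    · rw [if_pos (by simp [hc])]
      rw [ih _ ?_]
      · congr 1
        by_cases hm : p.1 ∈ t.keys
        · rw [PySem.Set.add_of_mem hm, PySem.Dict.keys_insert_of_contains]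
          rwa [PySem.Dict.contains_iff_mem_keys]
        · rw [PySem.Set.add_of_not_mem hm, PySem.Dict.keys_insert_of_not_contains]
          rw [Bool.eq_false_iff]
          intro hcon
          exact hm ((PySem.Dict.contains_iff_mem_keys _ _).mp hcon)
      · intro q hq h
        rw [PySem.Dict.mem_keys_insert]
        exact Or.inr (hinv q (List.mem_cons_of_mem _ hq) h)

-- A's append-if loop over the merged items is a filter (keys are unique, so getD p.1 = p.2)
theorem A_filter_list (total : PySem.Dict String Int) (h : total.keys.Nodup) (mx : Int) :
    total.items.foldl (fun L p => if total.getD p.1 0 == mx then L ++ [p.1] else L) []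
      = (total.items.filter (fun p => p.2 == mx)).map (fun p => p.1) := by
  rw [PySem.List.foldl_congr_mem total.items _
      (fun (L : List String) (p : String × Int) => if p.2 == mx then L ++ [p.1] else L) []
      ?_]
  · simpa using PySem.List.foldl_append_if (fun (p : String × Int) => p.2 == mx) (fun p => p.1) total.items []
  · intro acc p hp
    have hg : total.getD p.1 0 = p.2 :=
      PySem.Dict.getD_of_mem_items total (by simpa using hp) h 0
    rw [hg]

-- characterization of B's single-pass loop from a (some b, w) state:
-- best becomes the running max, winners the keys attaining it (prefixed by w only if no reset happened)
theorem foldB_some (f : String → Int) (ks : List String) (b : Int) (w : List String) :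
    ks.foldl (pvStepB f) (some b, w)
      = (some (ks.foldl (fun m k => max m (f k)) b),
         (if ks.foldl (fun m k => max m (f k)) b = b then w else [])
           ++ ks.filter (fun k => f k == ks.foldl (fun m k => max m (f k)) b)) := by
  induction ks generalizing b w with
  | nil => simp
  | cons k rest ih =>
    have hle : ∀ (c : Int), c ≤ rest.foldl (fun m k => max m (f k)) c := by
      intro c
      have := (PySem.List.le_foldl_max (rest.map f) c).1
      simpa [List.foldl_map] using this
    simp only [List.foldl_cons, List.filter_cons]
    by_cases hgt : f k > b
    · rw [show pvStepB f (some b, w) k = (some (f k), [k]) from by simp [pvStepB, hgt]]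
      rw [ih]
      have hmax : max b (f k) = f k := by omega
      simp only [hmax]
      set M := rest.foldl (fun m k => max m (f k)) (f k) with hM
      have hfk : f k ≤ M := hle (f k)
      by_cases hMb : M = f k
      · simp [hMb]
        intro h; omega
      · have : (f k == M) = false := by simp [Ne.symm hMb]
        simp [hMb, this]
        intro h; omega
    · by_cases heq : f k = b
      · rw [show pvStepB f (some b, w) k = (some b, w ++ [k]) from by simp [pvStepB, heq]]
        rw [ih]
        have hmax : max b (f k) = b := by omega
        simp only [hmax]
        set M := rest.foldl (fun m k => max m (f k)) b with hM
        by_cases hMb : M = b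
        · simp [hMb, heq]
        · have : (f k == M) = false := by simp [heq]; omega
          simp [hMb, this]
      · rw [show pvStepB f (some b, w) k = (some b, w) from by simp [pvStepB, heq]; omega]
        rw [ih]
        have hmax : max b (f k) = b := by omega
        simp only [hmax]
        set M := rest.foldl (fun m k => max m (f k)) b with hM
        have hbM : b ≤ M := hle b
        have : (f k == M) = false := by simp; omega
        simp [this]

-- A's two phases written with the branch pushed inside the insert
theorem phase1_congr (dict1 dict2 : List (String × Int)) :
    dict1.foldl (fun t p =>
        if (PySem.Dict.mk dict2).contains p.1
        then t.insert p.1 ((PySem.Dict.mk dict1).getD p.1 0 + (PySem.Dict.mk dict2).getD p.1 0)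
        else t.insert p.1 ((PySem.Dict.mk dict1).getD p.1 0)) PySem.Dict.empty
      = dict1.foldl (fun t p => t.insert p.1
          (if (PySem.Dict.mk dict2).contains p.1
           then (PySem.Dict.mk dict1).getD p.1 0 + (PySem.Dict.mk dict2).getD p.1 0
           else (PySem.Dict.mk dict1).getD p.1 0)) PySem.Dict.empty :=
  PySem.List.foldl_congr_mem _ _ _ _
    (by intro acc x _; by_cases h : (PySem.Dict.mk dict2).contains x.1 <;> simp [h])

theorem contains_mk_mem (l : List (String × Int)) (k : String) :
    (PySem.Dict.mk l).contains k = decide (k ∈ l.map Prod.fst) := by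
  rw [PySem.Dict.contains_eq_decide_mem_keys]; simp [pysem]

-- the filtered items of a keys-indexed dict, projected to keys
theorem filter_map_keys (g : String → Int) (l : List String) (mx : Int) :
    ((l.map (fun k => (k, g k))).filter (fun p => p.2 == mx)).map Prod.fst
      = l.filter (fun k => g k == mx) := by
  induction l with
  | nil => rfl
  | cons k rest ih =>
    simp only [List.map_cons, List.filter_cons]
    by_cases h : (g k == mx) = true <;> simp [h, ih]

-- the heart of the equivalence: the two ports return the same list on every input
theorem main_eq (dict1 dict2 : List (String × Int)) :
    compute_most_frequent dict1 dict2 = compute_most_frequent_alt dict1 dict2 := by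
  unfold compute_most_frequent compute_most_frequent_alt pvMergeA
  dsimp only
  rw [phase1_congr]
  set g1 := PySem.Dict.mk dict1 with hg1
  set g2 := PySem.Dict.mk dict2 with hg2
  set F : String → Int := fun k => if g2.contains k then g1.getD k 0 + g2.getD k 0 else g1.getD k 0 with hF
  set f : String → Int := fun k => g1.getD k 0 + g2.getD k 0 with hf
  set P1 := dict1.foldl (fun t p => t.insert p.1 (F p.1)) PySem.Dict.empty with hP1
  set T := dict2.foldl (fun t p => if !(g1.contains p.1) then t.insert p.1 (g2.getD p.1 0) else t) P1 with hT
  set U := dict2.foldl (fun t p => t.insert p.1 p.2)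
      (dict1.foldl (fun t p => t.insert p.1 p.2) PySem.Dict.empty) with hU
  -- keys of phase 1
  have hP1keys : P1.keys = PySem.Set.ofList (dict1.map Prod.fst) := by
    rw [hP1, PySem.Dict.keys_foldl_insert_key dict1 Prod.fst (fun _ p => F p.1) PySem.Dict.empty]
    simp [PySem.Set.update_nil_left]
  -- keys of the merged dict and of the union dict coincide
  have hTkeys : T.keys = PySem.Set.update (PySem.Set.ofList (dict1.map Prod.fst)) (dict2.map Prod.fst) := by
    rw [hT, keys_phase2 g1 g2 dict2 P1 ?_, hP1keys]
    intro p _ hc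
    rw [hP1keys, PySem.Set.mem_ofList]
    rw [hg1, contains_mk_mem] at hc
    simpa using hc
  have hUkeys : U.keys = T.keys := by
    rw [hU, PySem.Dict.keys_foldl_insert_key dict2 Prod.fst (fun _ p => p.2) _,
        PySem.Dict.keys_foldl_insert_key dict1 Prod.fst (fun _ p => p.2) PySem.Dict.empty, hTkeys]
    simp [PySem.Set.update_nil_left]
  have hnodup : T.keys.Nodup := by
    rw [hTkeys]
    exact PySem.Set.nodup_update _ _ (PySem.Set.nodup_ofList _)
  -- on the merged keys the merged value is the sum of the two lookups
  have hval : ∀ k ∈ T.keys, T.getD k 0 = f k := by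
    intro k hk
    have hmem : k ∈ dict1.map Prod.fst ∨ k ∈ dict2.map Prod.fst := by
      rw [hTkeys] at hk
      rcases (PySem.Set.mem_update _ _ _).mp hk with h | h
      · exact Or.inl ((PySem.Set.mem_ofList _ _).mp h)
      · exact Or.inr h
    rw [hT, getD_phase2, hP1, getD_foldl_insert_fn]
    by_cases h1 : k ∈ dict1.map Prod.fst
    · have hc1 : g1.contains k = true := by rw [hg1, contains_mk_mem]; simpa using h1
      rw [if_neg (by simp [hc1]), if_pos h1]
      simp only [hF, hf]
      by_cases h2 : g2.contains k
      · rw [if_pos h2]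
      · rw [if_neg h2]
        have h20 : g2.getD k 0 = 0 :=
          PySem.Dict.getD_of_not_contains _ _ (by simpa using h2)
        rw [h20]
        ring
    · have hc1 : g1.contains k = false := by rw [hg1, contains_mk_mem]; simpa using h1
      have h2 : k ∈ dict2.map Prod.fst := hmem.resolve_left h1
      rw [if_pos ⟨h2, hc1⟩]
      simp only [hf]
      have h10 : g1.getD k 0 = 0 :=
        PySem.Dict.getD_of_not_contains _ _ hc1
      rw [h10]
      ring
  -- case on the (shared) key list
  cases hks : T.keys with
  | nil =>
    have hvals : T.values = [] := by
      rw [PySem.Dict.values_eq_map_keys T hnodup 0, hks]; rfl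
    have hmax : PySem.List.max? T.values (fun v => v) = none := by
      rw [hvals]; rfl
    rw [hmax]
    rw [hUkeys, hks]
    rfl
  | cons k rest =>
    have hkT : k ∈ T.keys := by rw [hks]; exact List.mem_cons_self
    have hrT : ∀ x ∈ rest, x ∈ T.keys := by intro x hx; rw [hks]; exact List.mem_cons_of_mem _ hx
    set M := rest.foldl (fun m x => max m (f x)) (f k) with hM
    -- A's maximum is M
    have hvals : T.values = (T.keys).map (fun x => T.getD x 0) :=
      PySem.Dict.values_eq_map_keys T hnodup 0
    have hmax : PySem.List.max? T.values (fun v => v) = some M := by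
      rw [hvals, hks, List.map_cons, PySem.List.max?_id_cons, List.foldl_map]
      congr 1
      rw [hval k hkT]
      exact PySem.List.foldl_congr_mem rest _ _ _
        (by intro acc x hx; rw [hval x (hrT x hx)])
    rw [hmax]
    -- A's list is the keys whose merged value is M
    have hitems : T.items = T.keys.map (fun x => (x, T.getD x 0)) :=
      PySem.Dict.items_eq_map_keys T hnodup 0
    have hA : T.items.foldl (fun L p => if T.getD p.1 0 == M then L ++ [p.1] else L) []
        = T.keys.filter (fun x => f x == M) := by
      rw [A_filter_list T hnodup M, hitems, filter_map_keys]
      exact List.filter_congr (by intro x hx; rw [hval x hx])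
    -- B's winners are the same list
    have hB : (U.keys.foldl (pvStepB f) (none, [])).2 = T.keys.filter (fun x => f x == M) := by
      rw [hUkeys, hks, List.foldl_cons]
      rw [show pvStepB f (none, []) k = (some (f k), [k]) from rfl]
      rw [foldB_some, ← hM]
      have hfkM : f k ≤ M := by
        have := (PySem.List.le_foldl_max (rest.map f) (f k)).1
        simpa [List.foldl_map, ← hM] using this
      simp only [List.filter_cons]
      by_cases hMk : M = f k
      · simp [hMk]
      · have : (f k == M) = false := by simp [Ne.symm hMk]
        simp [hMk, this]
    simp only [hA, hB]

-- ===== VERDICT (by name: the statement is the Claim_ definition above) =====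
theorem compute_most_frequent_spec : Claim_equal_compute_most_frequent := by
  intro dict1 dict2 _ _
  unfold Spec_compute_most_frequent
  exact main_eq dict1 dict2
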